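-- pv_equiv track=rewrite | github.com/floke75/ISCE_Caption_Pipeline | docs/alt_build_training_pair_standalone.py | _lb_boundary_index_for_cue
-- ===== SOURCE A (Python) =====
-- from typing import List, Dict, Any, Optional, Tuple
--
-- def _lb_boundary_index_for_cue(tokens_slice: list[dict], line1_len_chars: int) -> Optional[int]:
--     """
--     Return the index (in tokens_slice) of the last token on line 1,
--     using exact character counting of token text with single spaces.
--     """
--     if not tokens_slice or line1_len_chars <= 0:
--         return None
--     acc = 0
--     for j, t in enumerate(tokens_slice):
--         w = str(t.get("w") or "")
--         add = len(w)
--         if j > 0: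
--             add += 1  # single space between words
--         acc += add
--         if acc >= line1_len_chars:
--             return j
--     return None
-- ===== SOURCE B (Python) =====
-- from typing import Optional
--
--
-- def _bisect_left(a: list, x) -> int:
--     # classic bisect_left (identical to bisect.bisect_left)
--     lo, hi = 0, len(a)
--     while lo < hi:
--         mid = (lo + hi) // 2
--         if a[mid] < x:
--             lo = mid + 1
--         else:
--             hi = mid
--     return lo
--
--
-- def _lb_boundary_index_for_cue(tokens_slice: list, line1_len_chars: int) -> Optional[int]:
--     if not tokens_slice or line1_len_chars <= 0:
--         return None
--     # cumulative character counts (token text plus a separating space per gap)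
--     prefix = []
--     total = 0
--     for t in tokens_slice:
--         total += len(str(t.get("w") or "")) + (1 if prefix else 0)
--         prefix.append(total)
--     # prefix is non-decreasing: binary-search the first cumulative count >= line1_len_chars
--     i = _bisect_left(prefix, line1_len_chars)
--     return i if i < len(prefix) else None
-- ===== Notes on version B (the rewrite author's own statement) =====
-- stated objective: alternative
-- what changed: A's single scan that accumulates a running total and tests it against the threshold inside the loop is replaced by building a prefix-sum table of cumulative character counts and binary-searching it (bisect_left) for the first cumulative count >= line1_len_chars, mapping a not-found index to None.
import Mathlib
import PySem

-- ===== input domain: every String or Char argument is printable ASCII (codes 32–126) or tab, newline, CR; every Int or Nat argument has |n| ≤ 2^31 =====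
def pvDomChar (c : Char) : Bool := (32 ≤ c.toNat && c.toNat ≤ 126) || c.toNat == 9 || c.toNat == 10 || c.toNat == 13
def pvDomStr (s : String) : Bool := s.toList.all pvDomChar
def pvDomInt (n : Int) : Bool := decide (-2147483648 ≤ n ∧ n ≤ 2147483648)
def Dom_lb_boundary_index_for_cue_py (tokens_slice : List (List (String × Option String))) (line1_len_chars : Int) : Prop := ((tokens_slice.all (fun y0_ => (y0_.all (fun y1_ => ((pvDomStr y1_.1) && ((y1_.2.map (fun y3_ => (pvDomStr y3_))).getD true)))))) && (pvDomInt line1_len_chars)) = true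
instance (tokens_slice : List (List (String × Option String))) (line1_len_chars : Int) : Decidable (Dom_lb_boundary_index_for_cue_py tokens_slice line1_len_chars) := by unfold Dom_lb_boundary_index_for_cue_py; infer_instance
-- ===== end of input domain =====

-- B replaces A's single accumulate-and-test loop by a prefix-sum table searched with
-- binary search (bisect_left); objective: alternative structure, same exact result.

-- ===== PORT A =====
-- str(t.get("w") or "") : missing key or None or "" all give ""
def lbWord (t : List (String × Option String)) : String :=
  ((PySem.Dict.get? (PySem.Dict.mk t) "w").join).getD ""

def lbALoop (line1 : Int) : List (List (String × Option String)) → Int → Int → Option Int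
  | [], _, _ => none
  | t :: rest, j, acc =>
      let w := lbWord t
      let add := PySem.Str.len w + (if j > 0 then (1 : Int) else 0)
      let acc' := acc + add
      if acc' ≥ line1 then some j else lbALoop line1 rest (j + 1) acc'

def lb_boundary_index_for_cue_py (tokens_slice : List (List (String × Option String))) (line1_len_chars : Int) : Option Int :=
  if tokens_slice.isEmpty || line1_len_chars ≤ 0 then none
  else lbALoop line1_len_chars tokens_slice 0 0

-- ===== PORT B =====
-- the prefix-building loop of Source B (state: list built so far, running total)
def lbPrefix (tokens_slice : List (List (String × Option String))) : List Int :=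
  (tokens_slice.foldl (fun (st : List Int × Int) t =>
      let total := st.2 + (PySem.Str.len (lbWord t) + (if st.1.isEmpty then 0 else 1))
      (st.1 ++ [total], total)) ([], 0)).1

-- Source B's hand-written _bisect_left is byte-for-byte the bisect.bisect_left loop,
-- which is PySem.List.bisectLeft (exact: all indices stay in range).
def lb_boundary_index_for_cue_py_alt (tokens_slice : List (List (String × Option String))) (line1_len_chars : Int) : Option Int :=
  if tokens_slice.isEmpty || line1_len_chars ≤ 0 then none
  else
    let pref := lbPrefix tokens_slice
    let i := PySem.List.bisectLeft pref line1_len_chars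
    if i < pref.length then some (Int.ofNat i) else none

-- ===== PRECONDITION & SPEC =====
def Spec_lb_boundary_index_for_cue_py (tokens_slice : List (List (String × Option String))) (line1_len_chars : Int) (out : Option Int) : Prop := out = lb_boundary_index_for_cue_py_alt tokens_slice line1_len_chars
instance (tokens_slice : List (List (String × Option String))) (line1_len_chars : Int) (out : Option Int) : Decidable (Spec_lb_boundary_index_for_cue_py tokens_slice line1_len_chars out) := by unfold Spec_lb_boundary_index_for_cue_py; infer_instance

-- ===== CLAIM (what is proved, stated in full; the proofs are below) =====
def Claim_equal_lb_boundary_index_for_cue_py : Prop := ∀ (tokens_slice : List (List (String × Option String))) (line1_len_chars : Int), Dom_lb_boundary_index_for_cue_py tokens_slice line1_len_chars → Spec_lb_boundary_index_for_cue_py tokens_slice line1_len_chars (lb_boundary_index_for_cue_py tokens_slice line1_len_chars)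

-- ===== LEMMAS AND PROOFS =====

-- the sequence of cumulative counts, as a pure recursive function (proof vehicle)
def lbCum : List (List (String × Option String)) → Nat → Int → List Int
  | [], _, _ => []
  | t :: rest, j, acc =>
      (acc + (PySem.Str.len (lbWord t) + if 0 < j then 1 else 0)) ::
        lbCum rest (j + 1) (acc + (PySem.Str.len (lbWord t) + if 0 < j then 1 else 0))

-- linear search for the first index with x ≤ value (proof vehicle)
def lbFind (x : Int) : List Int → Option Nat
  | [] => none
  | v :: rest => if x ≤ v then some 0 else (lbFind x rest).map (· + 1)

theorem lbWord_len_nonneg (t : List (String × Option String)) : 0 ≤ PySem.Str.len (lbWord t) := by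
  simp

theorem lbALoop_eq_find (line1 : Int) (tokens : List (List (String × Option String))) :
    ∀ (n : Nat) (acc : Int),
      lbALoop line1 tokens (n : Int) acc =
        (lbFind line1 (lbCum tokens n acc)).map (fun i => ((n + i : Nat) : Int)) := by
  induction tokens with
  | nil => intro n acc; simp [lbALoop, lbCum, lbFind]
  | cons t rest ih =>
      intro n acc
      have hj : ((n : Int) > 0) = (0 < n) := by
        simp [Int.natCast_pos]
      simp only [lbALoop, lbCum, lbFind, hj]
      by_cases h : line1 ≤ acc + (PySem.Str.len (lbWord t) + if 0 < n then (1 : Int) else 0)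
      · simp only [ge_iff_le]
        rw [if_pos h, if_pos h]
        simp
      · simp only [ge_iff_le]
        rw [if_neg h, if_neg h]
        have := ih (n + 1) (acc + (PySem.Str.len (lbWord t) + if 0 < n then (1 : Int) else 0))
        rw [show ((n : Int) + 1) = (((n + 1 : Nat)) : Int) by push_cast; ring, this]
        cases lbFind line1 (lbCum rest (n + 1) (acc + (PySem.Str.len (lbWord t) + if 0 < n then 1 else 0))) with
        | none => simp
        | some i => simp; ring

theorem lbPrefix_fold_eq_cum (tokens : List (List (String × Option String))) :
    ∀ (p : List Int) (acc : Int),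
      (tokens.foldl (fun (st : List Int × Int) t =>
          let total := st.2 + (PySem.Str.len (lbWord t) + (if st.1.isEmpty then 0 else 1))
          (st.1 ++ [total], total)) (p, acc)).1 = p ++ lbCum tokens p.length acc := by
  induction tokens with
  | nil => intro p acc; simp [lbCum]
  | cons t rest ih =>
      intro p acc
      have hemp : (if p.isEmpty then (0 : Int) else 1) = (if 0 < p.length then 1 else 0) := by
        cases p <;> simp
      simp only [List.foldl_cons, hemp]
      rw [ih (p ++ [acc + (PySem.Str.len (lbWord t) + if 0 < p.length then 1 else 0)])]
      simp [lbCum]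

theorem lbPrefix_eq_cum (tokens : List (List (String × Option String))) :
    lbPrefix tokens = lbCum tokens 0 0 := by
  have := lbPrefix_fold_eq_cum tokens [] 0
  simpa [lbPrefix] using this

theorem lbCum_mem_ge (tokens : List (List (String × Option String))) :
    ∀ (n : Nat) (acc : Int) (v : Int), v ∈ lbCum tokens n acc → acc ≤ v := by
  induction tokens with
  | nil => intro n acc v hv; simp [lbCum] at hv
  | cons t rest ih =>
      intro n acc v hv
      have h0 : acc ≤ acc + (PySem.Str.len (lbWord t) + if 0 < n then 1 else 0) := by
        have := lbWord_len_nonneg t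
        split_ifs <;> omega
      simp only [lbCum, List.mem_cons] at hv
      rcases hv with h | h
      · omega
      · exact le_trans h0 (ih _ _ _ h)

theorem lbCum_pairwise (tokens : List (List (String × Option String))) :
    ∀ (n : Nat) (acc : Int), List.Pairwise (· ≤ ·) (lbCum tokens n acc) := by
  induction tokens with
  | nil => intro n acc; simp [lbCum]
  | cons t rest ih =>
      intro n acc
      simp only [lbCum, List.pairwise_cons]
      exact ⟨fun v hv => lbCum_mem_ge rest _ _ v hv, ih _ _⟩

-- characterization of lbFind by a split point
theorem lbFind_char (x : Int) (c : List Int) :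
    ∀ (b : Nat), b ≤ c.length →
      (∀ j, j < b → c.getD j 0 < x) →
      (∀ j, b ≤ j → j < c.length → x ≤ c.getD j 0) →
      lbFind x c = if b < c.length then some b else none := by
  induction c with
  | nil => intro b hb _ _; simp [lbFind]
  | cons v rest ih =>
      intro b hb h1 h2
      cases b with
      | zero =>
          have hx : x ≤ v := by simpa using h2 0 (Nat.zero_le _) (by simp)
          simp [lbFind, hx]
      | succ b' =>
          have hv : v < x := by simpa using h1 0 (Nat.succ_pos _)
          have hrec := ih b' (by simpa [Nat.succ_le_iff] using hb)
            (fun j hjb => by simpa using h1 (j + 1) (Nat.succ_lt_succ hjb))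
            (fun j hbj hj => by
              simpa using h2 (j + 1) (Nat.succ_le_succ hbj) (by simpa using Nat.succ_lt_succ hj))
          simp only [lbFind, if_neg (not_le.mpr hv), hrec]
          by_cases h : b' < rest.length
          · simp [h]
          · simp [h]

theorem bisect_eq_find (c : List Int) (x : Int) (hsorted : List.Pairwise (· ≤ ·) c) :
    (if PySem.List.bisectLeft c x < c.length then some (Int.ofNat (PySem.List.bisectLeft c x)) else none)
      = (lbFind x c).map (fun i : Nat => (i : Int)) := by
  obtain ⟨hle, hlt, hge⟩ := PySem.List.bisectLeft_spec c x hsorted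
  rw [lbFind_char x c (PySem.List.bisectLeft c x) hle
      (fun j hj => by
        have hjl : j < c.length := lt_of_lt_of_le hj hle
        rw [List.getD_eq_getElem c 0 hjl]; exact hlt j hjl hj)
      (fun j hbj hj => by rw [List.getD_eq_getElem c 0 hj]; exact hge j hj hbj)]
  by_cases h : PySem.List.bisectLeft c x < c.length
  · simp [h, Int.ofNat_eq_natCast]
  · simp [h]

-- ===== VERDICT (by name: the statement is the Claim_ definition above) =====
theorem lb_boundary_index_for_cue_py_spec : Claim_equal_lb_boundary_index_for_cue_py := by
  intro tokens line1 _
  unfold Spec_lb_boundary_index_for_cue_py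
  unfold lb_boundary_index_for_cue_py lb_boundary_index_for_cue_py_alt
  by_cases hg : tokens.isEmpty || line1 ≤ 0
  · simp [hg]
  · simp only [hg, if_false, Bool.false_eq_true]
    have hA := lbALoop_eq_find line1 tokens 0 0
    simp only [Nat.cast_zero, Nat.zero_add] at hA
    rw [hA, lbPrefix_eq_cum]
    exact (bisect_eq_find (lbCum tokens 0 0) line1 (lbCum_pairwise tokens 0 0)).symm
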